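-- pv_equiv track=rewrite | github.com/tgh561/AOIS | Lab_2/zhegalkin.py | get_zhegalkin
-- ===== SOURCE A (Python) =====
-- def get_zhegalkin(table, vars_list):
--     n = len(vars_list)
--     A = table[:]
--     for i in range(n):
--         for mask in range(1 << n):
--             if mask & (1 << i):
--                 A[mask] ^= A[mask ^ (1 << i)]
--     terms = []
--     for mask in range(1 << n):
--         if A[mask]:
--             if mask == 0:
--                 terms.append("1")
--             else:
--                 term = "".join(vars_list[j] for j in range(n) if mask & (1 << j))
--                 terms.append(term)
--     return " ⊕ ".join(terms) or "0"
-- ===== SOURCE B (Python) =====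
-- def _transform(xs):
--     # divide-and-conquer XOR subset (zeta) transform
--     if len(xs) <= 1:
--         return xs[:]
--     h = len(xs) // 2
--     lo = _transform(xs[:h])
--     hi = _transform(xs[h:])
--     return lo + [a ^ b for a, b in zip(lo, hi)]
--
-- def get_zhegalkin(table, vars_list):
--     n = len(vars_list)
--     coeffs = _transform(table[:1 << n])
--     terms = []
--     for mask in range(1 << n):
--         if coeffs[mask]:
--             if mask == 0:
--                 terms.append("1")
--             else:
--                 term = "".join(vars_list[j] for j in range(n) if mask & (1 << j))
--                 terms.append(term)
--     return " ⊕ ".join(terms) or "0"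
-- ===== Notes on version B (the rewrite author's own statement) =====
-- stated objective: alternative
-- what changed: The iterative in-place layered butterfly over the bit index (n passes mutating the coefficient array) is replaced by a recursive divide-and-conquer XOR subset transform: split the table in half, transform each half, and append the pointwise XOR of the two transformed halves; the term-building tail is unchanged.
import Mathlib
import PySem

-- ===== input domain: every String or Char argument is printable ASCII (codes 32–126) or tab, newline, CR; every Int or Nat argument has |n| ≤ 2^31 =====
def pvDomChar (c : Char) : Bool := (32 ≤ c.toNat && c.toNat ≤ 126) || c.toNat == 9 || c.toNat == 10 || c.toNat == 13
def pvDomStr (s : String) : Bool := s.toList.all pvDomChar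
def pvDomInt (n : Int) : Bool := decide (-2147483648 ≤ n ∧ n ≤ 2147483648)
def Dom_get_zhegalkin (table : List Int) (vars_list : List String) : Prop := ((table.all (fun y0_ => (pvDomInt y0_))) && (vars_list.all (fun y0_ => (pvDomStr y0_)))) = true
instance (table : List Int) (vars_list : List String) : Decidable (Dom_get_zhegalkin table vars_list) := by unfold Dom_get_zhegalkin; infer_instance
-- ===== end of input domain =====

-- B replaces A's iterative in-place butterfly over the bit index by a recursive
-- divide-and-conquer XOR subset transform (split in half, transform halves, zip-XOR);
-- objective: alternative algorithm of similar cost; return values are proved equal.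

-- ===== PORT A =====
-- literal transliteration of A: copy table, layered in-place butterfly
-- (for i in range(n): for mask in range(1<<n): if mask & (1<<i): A[mask] ^= A[mask^(1<<i)]),
-- then the term-building loop.  Loop indices i, j, mask come from pyRange and are ≥ 0,
-- so `1 << i` is ported exactly as (1 : Int) <<< i.toNat.
def get_zhegalkin (table : List Int) (vars_list : List String) : String :=
  let n := vars_list.length
  let A := (PySem.List.pyRange 0 (n : Int) 1).foldl (fun A i =>
    (PySem.List.pyRange 0 ((1 : Int) <<< n) 1).foldl (fun A mask =>
      if PySem.Int.band mask ((1 : Int) <<< i.toNat) ≠ 0 then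
        PySem.List.pySetD A mask (PySem.Int.bxor (PySem.List.pyGetD A mask 0)
          (PySem.List.pyGetD A (PySem.Int.bxor mask ((1 : Int) <<< i.toNat)) 0))
      else A) A) table
  let terms := (PySem.List.pyRange 0 ((1 : Int) <<< n) 1).foldl (fun terms mask =>
    if PySem.List.pyGetD A mask 0 ≠ 0 then
      if mask = 0 then terms ++ ["1"]
      else terms ++ [PySem.Str.join "" (((PySem.List.pyRange 0 (n : Int) 1).filter
        (fun j => PySem.Int.band mask ((1 : Int) <<< j.toNat) ≠ 0)).map
        (fun j => PySem.List.pyGetD vars_list j ""))]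
    else terms) []
  let s := PySem.Str.join " ⊕ " terms
  if s = "" then "0" else s

-- ===== PORT B =====
-- Source B's _transform: recursive divide-and-conquer XOR subset transform.
def pvTransform (xs : List Int) : List Int :=
  if xs.length ≤ 1 then xs
  else
    let h := xs.length / 2
    let lo := pvTransform (PySem.List.slice xs none (some (h : Int)))
    let hi := pvTransform (PySem.List.slice xs (some (h : Int)) none)
    lo ++ (lo.zip hi).map (fun p => PySem.Int.bxor p.1 p.2)
termination_by xs.length
decreasing_by
  · simp only [PySem.List.slice_to_natCast, List.length_take]; omega
  · simp only [PySem.List.slice_from_natCast, List.length_drop]; omega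

def get_zhegalkin_alt (table : List Int) (vars_list : List String) : String :=
  let n := vars_list.length
  let coeffs := pvTransform (PySem.List.slice table none (some ((1 : Int) <<< n)))
  let terms := (PySem.List.pyRange 0 ((1 : Int) <<< n) 1).foldl (fun terms mask =>
    if PySem.List.pyGetD coeffs mask 0 ≠ 0 then
      if mask = 0 then terms ++ ["1"]
      else terms ++ [PySem.Str.join "" (((PySem.List.pyRange 0 (n : Int) 1).filter
        (fun j => PySem.Int.band mask ((1 : Int) <<< j.toNat) ≠ 0)).map
        (fun j => PySem.List.pyGetD vars_list j ""))]
    else terms) []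
  let s := PySem.Str.join " ⊕ " terms
  if s = "" then "0" else s

-- ===== PRECONDITION & SPEC =====
-- Python A indexes table at every mask < 2**len(vars_list) and raises IndexError
-- when the table is shorter; Pre_ is exactly A's non-raising domain.
def Pre_get_zhegalkin (table : List Int) (vars_list : List String) : Prop :=
  2 ^ vars_list.length ≤ table.length
instance (table : List Int) (vars_list : List String) : Decidable (Pre_get_zhegalkin table vars_list) := by unfold Pre_get_zhegalkin; infer_instance
def pvWitness_get_zhegalkin : List Int × List String := ([1, 0, 1, 1], ["x", "y"])

def Spec_get_zhegalkin (table : List Int) (vars_list : List String) (out : String) : Prop := out = get_zhegalkin_alt table vars_list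
instance (table : List Int) (vars_list : List String) (out : String) : Decidable (Spec_get_zhegalkin table vars_list out) := by unfold Spec_get_zhegalkin; infer_instance

-- ===== CLAIM (what is proved, stated in full; the proofs are below) =====
def Claim_equal_get_zhegalkin : Prop := ∀ (table : List Int) (vars_list : List String), Dom_get_zhegalkin table vars_list → Pre_get_zhegalkin table vars_list → Spec_get_zhegalkin table vars_list (get_zhegalkin table vars_list)

-- ===== LEMMAS AND PROOFS =====

-- the functional butterfly: pvF g i m is the coefficient at index m after the
-- passes for bits 0..i-1, starting from the coefficient function g
def pvF (g : Nat → Int) : Nat → Nat → Int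
  | 0, m => g m
  | i+1, m => if m.testBit i then PySem.Int.bxor (pvF g i m) (pvF g i (m ^^^ 2^i)) else pvF g i m

-- Nat-indexed forms of A's two transform loops
def pvStep (i N : Nat) (L : List Int) : List Int :=
  (List.range N).foldl (fun L mask =>
    if mask &&& 2^i ≠ 0 then
      L.set mask (PySem.Int.bxor (L.getD mask 0) (L.getD (mask ^^^ 2^i) 0))
    else L) L

def pvA (table : List Int) (n i : Nat) : List Int :=
  (List.range i).foldl (fun L j => pvStep j (2^n) L) table

-- Nat-indexed form of the shared term-building loop
def pvTerms (C : List Int) (vars : List String) (n : Nat) : List String :=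
  (List.range (2^n)).foldl (fun terms mask =>
    if C.getD mask 0 ≠ 0 then
      if mask = 0 then terms ++ ["1"]
      else terms ++ [PySem.Str.join "" (((List.range n).filter
        (fun j => mask &&& 2^j ≠ 0)).map (fun j => vars.getD j ""))]
    else terms) []

lemma pvShift (k : Nat) : (1 : Int) <<< k = ((2^k : Nat) : Int) := by
  rw [Int.shiftLeft_eq]; push_cast; ring

lemma pvShiftI (k : Nat) : (1 : Int) <<< (k : Int) = ((2^k : Nat) : Int) := by
  rw [Int.shiftLeft_natCast_right]; exact pvShift k

lemma pvAnd (m i : Nat) : (m &&& 2^i ≠ 0) ↔ m.testBit i := by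
  rw [Nat.and_two_pow]; rcases h : m.testBit i <;> simp

lemma pvXor (s k : Nat) (hs : s < 2^k) : s ^^^ 2^k = 2^k + s := by
  have hb : ∀ j, k < j → (2^k + s).testBit j = false := by
    intro j h
    apply Nat.testBit_lt_two_pow
    calc 2^k + s < 2^k + 2^k := by omega
      _ = 2^(k+1) := by ring
      _ ≤ 2^j := Nat.pow_le_pow_right (by norm_num) h
  apply Nat.eq_of_testBit_eq; intro j
  rcases lt_trichotomy j k with h | rfl | h
  · rw [Nat.testBit_xor, Nat.testBit_two_pow_add_gt h, Nat.testBit_two_pow_of_ne (by omega)]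
    simp
  · rw [Nat.testBit_xor, Nat.testBit_two_pow_self, Nat.testBit_two_pow_add_eq,
      Nat.testBit_lt_two_pow hs]; simp
  · rw [Nat.testBit_xor, Nat.testBit_two_pow_of_ne (by omega), hb j h,
      Nat.testBit_lt_two_pow (lt_trans hs (Nat.pow_lt_pow_right (by norm_num) h))]; simp

lemma pvXor_sub (m k : Nat) (h1 : 2^k ≤ m) (h2 : m < 2^(k+1)) : m ^^^ 2^k = m - 2^k := by
  have hs : m - 2^k < 2^k := by
    have := Nat.pow_succ 2 k; omega
  have hm : m = (m - 2^k) ^^^ 2^k := by rw [pvXor _ _ hs]; omega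
  calc m ^^^ 2^k = ((m - 2^k) ^^^ 2^k) ^^^ 2^k := by rw [← hm]
    _ = m - 2^k := by rw [Nat.xor_assoc, Nat.xor_self, Nat.xor_zero]

lemma pvTestBit_high (m k : Nat) (h1 : 2^k ≤ m) (h2 : m < 2^(k+1)) : m.testBit k = true := by
  have h3 : m = 2^k + (m - 2^k) := by omega
  have hs : m - 2^k < 2^k := by have := Nat.pow_succ 2 k; omega
  rw [h3, Nat.testBit_two_pow_add_eq, Nat.testBit_lt_two_pow hs]; rfl

lemma pvLow_of_not_testBit (m k : Nat) (h2 : m < 2^(k+1)) (hb : m.testBit k = false) : m < 2^k := by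
  by_contra h
  rw [pvTestBit_high m k (by omega) h2] at hb; simp at hb

lemma pvF_shift (g : Nat → Int) (c : Nat) :
    ∀ i, (∀ j, j < i → c.testBit j = false) → ∀ m,
      pvF g i (m ^^^ c) = pvF (fun s => g (s ^^^ c)) i m := by
  intro i
  induction i with
  | zero => intro _ m; rfl
  | succ i ih =>
    intro hc m
    have hci : c.testBit i = false := hc i (by omega)
    have hb : (m ^^^ c).testBit i = m.testBit i := by
      rw [Nat.testBit_xor, hci, Bool.xor_false]
    have hx : (m ^^^ c) ^^^ 2^i = (m ^^^ 2^i) ^^^ c := by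
      rw [Nat.xor_assoc, Nat.xor_comm c (2^i), ← Nat.xor_assoc]
    simp only [pvF, hb]
    rw [hx, ih (fun j hj => hc j (by omega)), ih (fun j hj => hc j (by omega))]

lemma pvF_congr (g1 g2 : Nat → Int) :
    ∀ i, (∀ s, s < 2^i → g1 s = g2 s) → ∀ m, m < 2^i → pvF g1 i m = pvF g2 i m := by
  intro i
  induction i generalizing g1 g2 with
  | zero =>
    intro hg m hm
    have : m = 0 := by omega
    subst this; exact hg 0 (by norm_num)
  | succ i ih =>
    intro hg m hm
    have hlt : 2^i < 2^(i+1) := Nat.pow_lt_pow_right (by norm_num) (by omega)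
    rcases hb : m.testBit i with hb' | hb'
    · -- bit i clear: m < 2^i
      have hm' : m < 2^i := pvLow_of_not_testBit m i hm hb
      simp only [pvF, hb, Bool.false_eq_true, if_false]
      exact ih g1 g2 (fun s hs => hg s (by omega)) m hm'
    · -- bit i set
      have hge : 2^i ≤ m := by
        by_contra h
        rw [Nat.testBit_lt_two_pow (by omega)] at hb; simp at hb
      have hsub : m ^^^ 2^i = m - 2^i := pvXor_sub m i hge hm
      have hm' : m - 2^i < 2^i := by have := Nat.pow_succ 2 i; omega
      have hrep : m = (m - 2^i) ^^^ 2^i := by rw [pvXor _ _ hm']; omega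
      have hcbits : ∀ j, j < i → (2^i : Nat).testBit j = false := by
        intro j hj; exact Nat.testBit_two_pow_of_ne (by omega)
      have hshift : ∀ g : Nat → Int, pvF g i m = pvF (fun s => g (s ^^^ 2^i)) i (m - 2^i) := by
        intro g
        conv_lhs => rw [hrep]
        exact pvF_shift g (2^i) i hcbits (m - 2^i)
      simp only [pvF, hb, if_true]
      have e1 : pvF g1 i m = pvF g2 i m := by
        rw [hshift g1, hshift g2]
        refine ih _ _ (fun s hs => ?_) _ hm'
        have : s ^^^ 2^i = 2^i + s := pvXor s i hs
        exact hg (s ^^^ 2^i) (by omega)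
      have e2 : pvF g1 i (m ^^^ 2^i) = pvF g2 i (m ^^^ 2^i) := by
        rw [hsub]; exact ih g1 g2 (fun s hs => hg s (by omega)) _ hm'
      rw [e1, e2]

lemma pvStep_length (i N : Nat) (L : List Int) : (pvStep i N L).length = L.length := by
  induction N with
  | zero => rfl
  | succ N ih =>
    unfold pvStep at *
    rw [List.range_succ, List.foldl_append, List.foldl_cons, List.foldl_nil]
    split
    · rw [List.length_set]; exact ih
    · exact ih

lemma pvGetD_set (xs : List Int) (n : Nat) (w : Int) (m : Nat) (h : n < xs.length) :
    (xs.set n w).getD m 0 = if m = n then w else xs.getD m 0 := by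
  by_cases hm : m = n
  · subst hm; simp [List.getD_eq_getElem?_getD, h]
  · simp [List.getD_eq_getElem?_getD, hm, Ne.symm hm]

lemma pvStep_getD (i n : Nat) (L : List Int) (hlen : 2^n ≤ L.length) :
    ∀ k, k ≤ 2^n → ∀ m, (pvStep i k L).getD m 0 =
      if m < k ∧ m.testBit i then PySem.Int.bxor (L.getD m 0) (L.getD (m ^^^ 2^i) 0)
      else L.getD m 0 := by
  intro k
  induction k with
  | zero => intro _ m; simp [pvStep]
  | succ k ih =>
    intro hk m
    have hk' : k ≤ 2^n := by omega
    have hstep : pvStep i (k+1) L =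
        (fun L mask => if mask &&& 2^i ≠ 0 then
          L.set mask (PySem.Int.bxor (L.getD mask 0) (L.getD (mask ^^^ 2^i) 0))
          else L) (pvStep i k L) k := by
      unfold pvStep
      rw [List.range_succ, List.foldl_append, List.foldl_cons, List.foldl_nil]
    rw [hstep]
    simp only []
    by_cases hb : k.testBit i = true
    · -- bit set at k: write position k
      rw [if_pos ((pvAnd k i).mpr hb)]
      have hkread : (pvStep i k L).getD k 0 = L.getD k 0 := by
        rw [ih hk' k, if_neg (by omega)]
      have hxread : (pvStep i k L).getD (k ^^^ 2^i) 0 = L.getD (k ^^^ 2^i) 0 := by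
        rw [ih hk' (k ^^^ 2^i), if_neg]
        rintro ⟨-, hbit⟩
        rw [Nat.testBit_xor, hb, Nat.testBit_two_pow_self] at hbit
        simp at hbit
      rw [hkread, hxread,
        pvGetD_set _ _ _ _ (by rw [pvStep_length]; omega)]
      by_cases hmk : m = k
      · subst hmk
        rw [if_pos rfl, if_pos ⟨by omega, hb⟩]
      · rw [if_neg hmk, ih hk' m]
        by_cases hm1 : m < k + 1 ∧ m.testBit i
        · rw [if_pos ⟨by omega, hm1.2⟩, if_pos hm1]
        · rw [if_neg (fun h => hm1 ⟨by omega, h.2⟩), if_neg hm1]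
    · -- bit clear at k: no write
      rw [if_neg (fun h => hb ((pvAnd k i).mp h)), ih hk' m]
      by_cases hmk : m = k
      · subst hmk
        rw [if_neg (by simp [hb]), if_neg (by simp [hb])]
      · by_cases hm1 : m < k + 1 ∧ m.testBit i
        · rw [if_pos ⟨by omega, hm1.2⟩, if_pos hm1]
        · rw [if_neg (fun h => hm1 ⟨by omega, h.2⟩), if_neg hm1]

lemma pvA_spec (table : List Int) (n : Nat) (hlen : 2^n ≤ table.length) :
    ∀ i, i ≤ n → (pvA table n i).length = table.length ∧
      ∀ m, m < 2^n → (pvA table n i).getD m 0 = pvF (fun s => table.getD s 0) i m := by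
  intro i
  induction i with
  | zero => exact fun _ => ⟨rfl, fun m _ => rfl⟩
  | succ i ih =>
    intro hi
    obtain ⟨hL, hV⟩ := ih (by omega)
    have hstep : pvA table n (i+1) = pvStep i (2^n) (pvA table n i) := by
      unfold pvA
      rw [List.range_succ, List.foldl_append, List.foldl_cons, List.foldl_nil]
    constructor
    · rw [hstep, pvStep_length]; exact hL
    · intro m hm
      rw [hstep, pvStep_getD i n _ (by omega) (2^n) le_rfl m]
      simp only [pvF]
      by_cases hb : m.testBit i = true
      · rw [if_pos ⟨hm, hb⟩, if_pos hb]
        have hx : m ^^^ 2^i < 2^n :=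
          Nat.xor_lt_two_pow hm (Nat.pow_lt_pow_right (by norm_num) (by omega))
        rw [hV m hm, hV _ hx]
      · rw [if_neg (fun h => hb h.2), if_neg hb]
        exact hV m hm

lemma pvTransform_one (xs : List Int) (h : xs.length ≤ 1) : pvTransform xs = xs := by
  rw [pvTransform, if_pos h]

lemma pvTransform_split (xs : List Int) (h : ¬ xs.length ≤ 1) :
    pvTransform xs =
      pvTransform (xs.take (xs.length / 2)) ++
      ((pvTransform (xs.take (xs.length / 2))).zip
        (pvTransform (xs.drop (xs.length / 2)))).map
        (fun p => PySem.Int.bxor p.1 p.2) := by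
  rw [pvTransform, if_neg h]
  simp only [PySem.List.slice_to_natCast, PySem.List.slice_from_natCast]

lemma pvTransform_length_pow :
    ∀ (k : Nat) (xs : List Int), xs.length = 2^k → (pvTransform xs).length = 2^k := by
  intro k
  induction k with
  | zero => intro xs hx; rw [pvTransform_one xs (by omega), hx]
  | succ k ih =>
    intro xs hx
    have hp : 1 ≤ 2^k := Nat.one_le_two_pow
    have hpow : 2^(k+1) = 2^k + 2^k := by ring
    have hne : ¬ xs.length ≤ 1 := by omega
    have hh : xs.length / 2 = 2^k := by omega
    have hlo : (pvTransform (xs.take (xs.length / 2))).length = 2^k :=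
      ih _ (by rw [List.length_take]; omega)
    have hhi : (pvTransform (xs.drop (xs.length / 2))).length = 2^k :=
      ih _ (by rw [List.length_drop]; omega)
    rw [pvTransform_split xs hne, List.length_append, List.length_map, List.length_zip,
      hlo, hhi]
    omega

lemma pvTransform_getD :
    ∀ (k : Nat) (xs : List Int), xs.length = 2^k → ∀ m, m < 2^k →
      (pvTransform xs).getD m 0 = pvF (fun s => xs.getD s 0) k m := by
  intro k
  induction k with
  | zero =>
    intro xs hx m hm
    have : m = 0 := by omega
    subst this
    rw [pvTransform_one xs (by omega)]; rfl
  | succ k ih =>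
    intro xs hx m hm
    have hp : 1 ≤ 2^k := Nat.one_le_two_pow
    have hpow : 2^(k+1) = 2^k + 2^k := by ring
    have hne : ¬ xs.length ≤ 1 := by omega
    have hh : xs.length / 2 = 2^k := by omega
    set lo := pvTransform (xs.take (xs.length / 2)) with hlo_def
    set hi := pvTransform (xs.drop (xs.length / 2)) with hhi_def
    have hlo : lo.length = 2^k := pvTransform_length_pow k _ (by rw [List.length_take]; omega)
    have hhi : hi.length = 2^k := pvTransform_length_pow k _ (by rw [List.length_drop]; omega)
    have htake : ∀ s, s < 2^k → (xs.take (xs.length / 2)).getD s 0 = xs.getD s 0 := by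
      intro s hs
      simp [List.getD_eq_getElem?_getD, hh, hs]
    have hdrop : ∀ s, s < 2^k → (xs.drop (xs.length / 2)).getD s 0 = xs.getD (2^k + s) 0 := by
      intro s hs
      simp [List.getD_eq_getElem?_getD, List.getElem?_drop, hh]
    have hcbits : ∀ j, j < k → (2^k : Nat).testBit j = false :=
      fun j hj => Nat.testBit_two_pow_of_ne (by omega)
    rw [pvTransform_split xs hne, ← hlo_def, ← hhi_def]
    by_cases hmk : m < 2^k
    · -- left half
      rw [List.getD_append _ _ _ m (by omega),
        ih (xs.take (xs.length / 2)) (by rw [List.length_take]; omega) m hmk]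
      have hb : m.testBit k = false := Nat.testBit_lt_two_pow hmk
      simp only [pvF, hb, Bool.false_eq_true, if_false]
      exact pvF_congr _ _ k htake m hmk
    · -- right half
      have hge : 2^k ≤ m := by omega
      have hm' : m - 2^k < 2^k := by omega
      have hzl : (lo.zip hi).length = 2^k := by rw [List.length_zip, hlo, hhi]; omega
      rw [List.getD_append_right _ _ _ m (by omega)]
      simp only [hlo]
      rw [List.getD_eq_getElem _ _ (by rw [List.length_map, hzl]; omega),
        List.getElem_map, List.getElem_zip]
      have hbl : lo[m - 2^k] = pvF (fun s => xs.getD s 0) k (m - 2^k) := by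
        rw [← List.getD_eq_getElem lo 0 (by omega),
          ih (xs.take (xs.length / 2)) (by rw [List.length_take]; omega) _ hm']
        exact pvF_congr _ _ k htake _ hm'
      have hbr : hi[m - 2^k] = pvF (fun s => xs.getD s 0) k m := by
        rw [← List.getD_eq_getElem hi 0 (by omega),
          ih (xs.drop (xs.length / 2)) (by rw [List.length_drop]; omega) _ hm']
        have hrep : m = (m - 2^k) ^^^ 2^k := by rw [pvXor _ _ hm']; omega
        conv_rhs => rw [hrep]
        rw [pvF_shift _ (2^k) k hcbits (m - 2^k)]
        refine pvF_congr _ _ k (fun s hs => ?_) _ hm'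
        rw [hdrop s hs, pvXor s k hs]
      have hb : m.testBit k = true := pvTestBit_high m k hge hm
      simp only [pvF, hb, if_true, hbl, hbr]
      rw [pvXor_sub m k hge hm, PySem.Int.bxor_comm]

-- conversion of A's transform loops to the Nat-indexed form
lemma portA_loop (table : List Int) (n : Nat) :
    (PySem.List.pyRange 0 (n : Int) 1).foldl (fun A i =>
      (PySem.List.pyRange 0 ((1 : Int) <<< n) 1).foldl (fun A mask =>
        if PySem.Int.band mask ((1 : Int) <<< i.toNat) ≠ 0 then
          PySem.List.pySetD A mask (PySem.Int.bxor (PySem.List.pyGetD A mask 0)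
            (PySem.List.pyGetD A (PySem.Int.bxor mask ((1 : Int) <<< i.toNat)) 0))
        else A) A) table = pvA table n n := by
  simp only [pvShift, PySem.List.pyRange_zero_nat, List.foldl_map, Int.toNat_natCast,
    pvShiftI, PySem.Int.band_natCast, PySem.Int.bxor_natCast, PySem.List.pyGetD_natCast,
    PySem.List.pySetD_natCast, Nat.cast_ne_zero]
  rfl

-- conversion of the shared term loop to the Nat-indexed form
lemma portTail (C : List Int) (vars : List String) (n : Nat) :
    (PySem.List.pyRange 0 ((1 : Int) <<< n) 1).foldl (fun terms mask =>
      if PySem.List.pyGetD C mask 0 ≠ 0 then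
        if mask = 0 then terms ++ ["1"]
        else terms ++ [PySem.Str.join "" (((PySem.List.pyRange 0 (n : Int) 1).filter
          (fun j => PySem.Int.band mask ((1 : Int) <<< j.toNat) ≠ 0)).map
          (fun j => PySem.List.pyGetD vars j ""))]
      else terms) [] = pvTerms C vars n := by
  simp only [pvShift, PySem.List.pyRange_zero_nat, List.foldl_map, Int.toNat_natCast,
    pvShiftI, PySem.Int.band_natCast, PySem.List.pyGetD_natCast, Nat.cast_ne_zero,
    Nat.cast_eq_zero, List.filter_map, List.map_map, Function.comp_def]
  rfl

lemma pvTerms_congr (C1 C2 : List Int) (vars : List String) (n : Nat)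
    (h : ∀ m, m < 2^n → C1.getD m 0 = C2.getD m 0) :
    pvTerms C1 vars n = pvTerms C2 vars n := by
  unfold pvTerms
  refine PySem.List.foldl_congr_mem _ _ _ _ ?_
  intro acc mask hmask
  rw [h mask (List.mem_range.mp hmask)]

-- ===== VERDICT (by name: the statement is the Claim_ definition above) =====
theorem get_zhegalkin_spec : Claim_equal_get_zhegalkin := by
  unfold Claim_equal_get_zhegalkin
  intro table vars _ hpre
  unfold Pre_get_zhegalkin at hpre
  unfold Spec_get_zhegalkin
  simp only [get_zhegalkin, get_zhegalkin_alt]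
  rw [portA_loop, portTail, portTail, pvShift, PySem.List.slice_to_natCast]
  have hT : pvTerms (pvA table vars.length vars.length) vars vars.length
      = pvTerms (pvTransform (List.take (2 ^ vars.length) table)) vars vars.length := by
    apply pvTerms_congr
    intro m hm
    rw [(pvA_spec table vars.length hpre vars.length le_rfl).2 m hm,
      pvTransform_getD vars.length _ (by rw [List.length_take]; omega) m hm]
    refine pvF_congr _ _ vars.length (fun s hs => ?_) m hm
    simp [List.getD_eq_getElem?_getD, hs]
  rw [hT]
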